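-- pv_equiv track=rewrite | github.com/Abel-ai-causality/Abel-skills | causal-abel/scripts/cap_probe.py | _normalize_argv
-- ===== SOURCE A (Python) =====
-- GLOBAL_OPTIONS = {
--     "--base-url": True,
--     "--api-key": True,
--     "--env-file": True,
--     "--pick-fields": True,
--     "--compact": False,
-- }
--
-- COMMANDS = {
--     "capabilities",
--     "observe",
--     "neighbors",
--     "paths",
--     "markov-blanket",
--     "intervene-do",
--     "traverse-parents",
--     "traverse-children",
--     "validate-connectivity",
--     "abel-markov-blanket",
--     "counterfactual-preview",
--     "intervene-time-lag",
--     "verb",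
--     "route",
-- }
--
-- def _normalize_argv(argv: list[str]) -> list[str]:
--     if not argv:
--         return argv
--
--     prefix: list[str] = []
--     suffix: list[str] = []
--     command_seen = False
--     i = 0
--     while i < len(argv):
--         token = argv[i]
--         if not command_seen and token in COMMANDS:
--             command_seen = True
--             suffix.append(token)
--             i += 1
--             continue
--
--         if command_seen and token in GLOBAL_OPTIONS:
--             prefix.append(token)
--             if GLOBAL_OPTIONS[token]:
--                 if i + 1 >= len(argv):
--                     raise ValueError(f"Missing value for {token}")
--                 prefix.append(argv[i + 1])
--                 i += 2
--             else:
--                 i += 1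
--             continue
--
--         if command_seen:
--             suffix.append(token)
--         else:
--             prefix.append(token)
--         i += 1
--
--     return prefix + suffix
-- ===== SOURCE B (Python) =====
-- GLOBAL_OPTIONS = {
--     "--base-url": True,
--     "--api-key": True,
--     "--env-file": True,
--     "--pick-fields": True,
--     "--compact": False,
-- }
--
-- COMMANDS = {
--     "capabilities",
--     "observe",
--     "neighbors",
--     "paths",
--     "markov-blanket",
--     "intervene-do",
--     "traverse-parents",
--     "traverse-children",
--     "validate-connectivity",
--     "abel-markov-blanket",
--     "counterfactual-preview",
--     "intervene-time-lag",
--     "verb",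
--     "route",
-- }
--
--
-- def _normalize_argv(argv: list[str]) -> list[str]:
--     # Stage 1: locate the first command; everything before it is untouched.
--     for idx, cmd in enumerate(argv):
--         if cmd in COMMANDS:
--             break
--     else:
--         return list(argv)
--     tail = argv[idx + 1:]
--     # Stage 2: flag-fold over the tail producing a boolean mask: True marks a
--     # global option (or the value it consumes), no index arithmetic.
--     moved = []
--     consume = False
--     for t in tail:
--         if consume:
--             moved.append(True)
--             consume = False
--         elif t in GLOBAL_OPTIONS:
--             moved.append(True)
--             consume = GLOBAL_OPTIONS[t]
--         else:
--             moved.append(False)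
--     if consume:
--         raise ValueError(f"Missing value for {tail[-1]}")
--     # Stage 3: stable partition of the tail by the mask.
--     return (argv[:idx]
--             + [t for t, m in zip(tail, moved) if m]
--             + [cmd]
--             + [t for t, m in zip(tail, moved) if not m])
-- ===== Notes on version B (the rewrite author's own statement) =====
-- stated objective: alternative
-- what changed: Replaces A's single index-jumping state machine (command_seen flag, i+=2 to consume option values, interleaved appends to two accumulators) by three staged passes: locate the first command, flag-fold a boolean 'moved' mask over the tail with a consume-carry, then stably partition the tail by the mask with two zip-filter comprehensions.
import Mathlib
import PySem

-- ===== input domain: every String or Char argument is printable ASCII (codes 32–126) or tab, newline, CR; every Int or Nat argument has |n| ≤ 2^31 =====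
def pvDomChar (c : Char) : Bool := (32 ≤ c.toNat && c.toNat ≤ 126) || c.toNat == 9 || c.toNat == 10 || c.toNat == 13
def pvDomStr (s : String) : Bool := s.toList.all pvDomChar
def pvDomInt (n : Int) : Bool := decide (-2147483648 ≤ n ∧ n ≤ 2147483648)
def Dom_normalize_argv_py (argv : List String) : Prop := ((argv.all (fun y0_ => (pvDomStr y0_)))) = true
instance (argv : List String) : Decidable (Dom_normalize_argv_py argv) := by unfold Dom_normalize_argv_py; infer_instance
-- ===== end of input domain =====

-- B replaces A's single index-jumping state machine by three stages: find the first
-- command, flag-fold a boolean mask over the tail, then stably partition the tail by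
-- the mask. Objective: alternative decomposition (same O(n) cost). Equivalence is
-- about the return value on inputs where the Python does not raise (Pre_ below).

-- ===== PORT A =====
def pvGlobalOptions : PySem.Dict String Bool :=
  PySem.Dict.ofList [("--base-url", true), ("--api-key", true), ("--env-file", true),
                     ("--pick-fields", true), ("--compact", false)]

def pvCommands : List String :=
  ["capabilities", "observe", "neighbors", "paths", "markov-blanket", "intervene-do",
   "traverse-parents", "traverse-children", "validate-connectivity", "abel-markov-blanket",
   "counterfactual-preview", "intervene-time-lag", "verb", "route"]

-- A's while-loop: state (prefix, suffix, command_seen), index i replaced by the remaining list.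
def normAloop (pre suf : List String) (seen : Bool) (rest : List String) : List String :=
  match rest with
  | [] => pre ++ suf
  | t :: rs =>
    if !seen && pvCommands.contains t then
      normAloop pre (suf ++ [t]) true rs
    else if seen && pvGlobalOptions.contains t then
      if pvGlobalOptions.getD t false then
        match rs with
        | [] => (pre ++ [t]) ++ suf   -- Python raises ValueError here; excluded by Pre_
        | v :: rs' => normAloop (pre ++ [t, v]) suf seen rs'
      else normAloop (pre ++ [t]) suf seen rs
    else if seen then normAloop pre (suf ++ [t]) seen rs
    else normAloop (pre ++ [t]) suf seen rs

def normalize_argv_py (argv : List String) : List String :=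
  if argv = [] then argv else normAloop [] [] false argv

-- ===== PORT B =====
-- stage 1: linear search for the first command (Python's for/enumerate with else):
-- returns (tokens before it, the command, tokens after), or none
def findCmdB : List String → Option (List String × String × List String)
  | [] => none
  | t :: rs =>
    if pvCommands.contains t then some ([], t, rs)
    else
      match findCmdB rs with
      | none => none
      | some (b, c, aft) => some (t :: b, c, aft)

-- stage 2: the flag-fold producing the 'moved' mask (consume carries a pending value)
def maskB : Bool → List String → List Bool
  | _, [] => []          -- if consume is still true here Python raises; excluded by Pre_
  | true, _ :: ts => true :: maskB false ts
  | false, t :: ts =>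
    if pvGlobalOptions.contains t then true :: maskB (pvGlobalOptions.getD t false) ts
    else false :: maskB false ts

-- stage 3: stable partition of the tail by the mask (the two zip-comprehensions)
def normalize_argv_py_alt (argv : List String) : List String :=
  match findCmdB argv with
  | none => argv
  | some (before, cmd, tail) =>
    let moved := maskB false tail
    before ++ ((tail.zip moved).filter (fun p => p.2)).map Prod.fst
           ++ [cmd]
           ++ ((tail.zip moved).filter (fun p => !p.2)).map Prod.fst

-- ===== PRECONDITION & SPEC =====
-- Value-taking global options (the keys of GLOBAL_OPTIONS mapped to True)
def pvValueOpts : List String := ["--base-url", "--api-key", "--env-file", "--pick-fields"]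

-- Both Pythons raise ValueError exactly when a command occurs before the trailing run of
-- value-taking option tokens and that run has odd length (its last token is then a reached
-- value-taking option with no value behind it); Pre_ excludes exactly those raising inputs.
def pvPreCheck (argv : List String) : Bool :=
  match argv.findIdx? (fun t => pvCommands.contains t) with
  | none => true
  | some idx =>
    let L := (argv.reverse.takeWhile (fun t => pvValueOpts.contains t)).length
    !(decide (idx < argv.length - L) && decide (L % 2 = 1))

def Pre_normalize_argv_py (argv : List String) : Prop := pvPreCheck argv = true
instance (argv : List String) : Decidable (Pre_normalize_argv_py argv) := by
  unfold Pre_normalize_argv_py; infer_instance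

def pvWitness_normalize_argv_py : List String :=
  ["--compact", "verb", "--api-key", "KEY", "target"]

def Spec_normalize_argv_py (argv : List String) (out : List String) : Prop := out = normalize_argv_py_alt argv
instance (argv : List String) (out : List String) : Decidable (Spec_normalize_argv_py argv out) := by unfold Spec_normalize_argv_py; infer_instance

-- ===== CLAIM (what is proved, stated in full; the proofs are below) =====
def Claim_equal_normalize_argv_py : Prop := ∀ (argv : List String), Dom_normalize_argv_py argv → Pre_normalize_argv_py argv → Spec_normalize_argv_py argv (normalize_argv_py argv)

-- ===== LEMMAS AND PROOFS =====

-- A's seen-phase loop equals "partition the remaining tail by B's mask".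
lemma normA_seen_eq_mask (n : Nat) :
    ∀ tail : List String, tail.length ≤ n → ∀ pre suf,
      normAloop pre suf true tail =
        pre ++ ((tail.zip (maskB false tail)).filter (fun p => p.2)).map Prod.fst
            ++ suf
            ++ ((tail.zip (maskB false tail)).filter (fun p => !p.2)).map Prod.fst := by
  induction n with
  | zero =>
    intro tail h pre suf
    have : tail = [] := List.eq_nil_of_length_eq_zero (Nat.le_zero.mp h)
    subst this; simp [normAloop, maskB]
  | succ n ih =>
    intro tail h pre suf
    cases tail with
    | nil => simp [normAloop, maskB]
    | cons t rs =>
      rw [normAloop.eq_def]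
      simp only [Bool.not_true, Bool.false_and, Bool.true_and, Bool.false_eq_true, if_false]
      by_cases hg : pvGlobalOptions.contains t = true
      · rw [if_pos hg]
        by_cases hv : pvGlobalOptions.getD t false = true
        · rw [if_pos hv]
          cases rs with
          | nil => simp [maskB, hg, List.zip, List.filter]
          | cons v rs' =>
            have hih := ih rs' (by simp at h ⊢; omega) (pre ++ [t, v]) suf
            simpa [maskB, hg, hv, List.zip, List.filter, List.append_assoc] using hih
        · rw [if_neg hv]
          rw [ih rs (Nat.le_of_succ_le_succ h)]
          have hv' : pvGlobalOptions.getD t false = false := by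
            cases hb : pvGlobalOptions.getD t false
            · rfl
            · exact absurd hb hv
          simp [maskB, hg, hv', List.zip, List.append_assoc]
      · rw [if_neg hg, if_pos trivial]
        rw [ih rs (Nat.le_of_succ_le_succ h)]
        simp [maskB, hg, List.zip, List.append_assoc]

-- A's unseen phase: it copies tokens into prefix until B's command search succeeds.
lemma normA_unseen_eq (rest : List String) :
    ∀ pre suf,
      normAloop pre suf false rest =
        match findCmdB rest with
        | none => pre ++ rest ++ suf
        | some (b, c, aft) => normAloop (pre ++ b) (suf ++ [c]) true aft := by
  induction rest with
  | nil => intro pre suf; simp [normAloop, findCmdB]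
  | cons t rs ih =>
    intro pre suf
    rw [normAloop.eq_def, findCmdB.eq_def]
    simp only [Bool.not_false, Bool.true_and, Bool.false_and, Bool.false_eq_true, if_false]
    by_cases hc : pvCommands.contains t = true
    · rw [if_pos hc, if_pos hc]
      simp
    · rw [if_neg hc, if_neg hc, ih]
      cases hf : findCmdB rs with
      | none => simp
      | some bca =>
        obtain ⟨b, c, aft⟩ := bca
        simp [List.append_assoc]

-- the two ports agree on every input (where the Pythons raise, both ports return the same value)
lemma norm_eq (argv : List String) : normalize_argv_py argv = normalize_argv_py_alt argv := by
  unfold normalize_argv_py normalize_argv_py_alt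
  by_cases h0 : argv = []
  · subst h0; simp [findCmdB]
  · rw [if_neg h0, normA_unseen_eq]
    cases hf : findCmdB argv with
    | none => simp
    | some bca =>
      obtain ⟨b, c, aft⟩ := bca
      simp only [List.nil_append]
      rw [normA_seen_eq_mask aft.length aft le_rfl b [c]]

-- ===== VERDICT (by name: the statement is the Claim_ definition above) =====
theorem normalize_argv_py_spec : Claim_equal_normalize_argv_py := by
  intro argv _ _
  unfold Spec_normalize_argv_py
  exact norm_eq argv
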